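-- pv_equiv track=rewrite | github.com/sachinkundu/cloglog | tests/test_makefile_gunicorn_invocation.py | _gunicorn_invocations
-- ===== SOURCE A (Python) =====
-- def _gunicorn_invocations(text: str) -> list[str]:
--     """Return each gunicorn invocation as a single joined string (line continuations resolved)."""
--     invocations: list[str] = []
--     lines = text.splitlines()
--     i = 0
--     while i < len(lines):
--         if "uv run gunicorn" in lines[i]:
--             joined = lines[i]
--             while joined.rstrip().endswith("\\") and i + 1 < len(lines):
--                 i += 1
--                 joined = joined.rstrip()[:-1] + " " + lines[i]
--             invocations.append(joined)
--         i += 1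
--     return invocations
-- ===== SOURCE B (Python) =====
-- def _gunicorn_invocations(text: str) -> list[str]:
--     """Single flat pass with an accumulator `current` instead of nested index-driven while loops."""
--     out: list[str] = []
--     current = None
--     for line in text.splitlines():
--         if current is None:
--             if "uv run gunicorn" not in line:
--                 continue
--             current = line
--         else:
--             current = current.rstrip()[:-1] + " " + line
--         if current.rstrip().endswith("\\"):
--             continue
--         out.append(current)
--         current = None
--     if current is not None:
--         out.append(current)
--     return out
-- ===== Notes on version B (the rewrite author's own statement) =====
-- stated objective: simpler
-- what changed: Replaced the nested index-driven while loops (outer scan plus inner continuation-consuming loop that mutates the shared index) by one flat single pass over the lines with an Option accumulator `current` and a final flush.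
import Mathlib
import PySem

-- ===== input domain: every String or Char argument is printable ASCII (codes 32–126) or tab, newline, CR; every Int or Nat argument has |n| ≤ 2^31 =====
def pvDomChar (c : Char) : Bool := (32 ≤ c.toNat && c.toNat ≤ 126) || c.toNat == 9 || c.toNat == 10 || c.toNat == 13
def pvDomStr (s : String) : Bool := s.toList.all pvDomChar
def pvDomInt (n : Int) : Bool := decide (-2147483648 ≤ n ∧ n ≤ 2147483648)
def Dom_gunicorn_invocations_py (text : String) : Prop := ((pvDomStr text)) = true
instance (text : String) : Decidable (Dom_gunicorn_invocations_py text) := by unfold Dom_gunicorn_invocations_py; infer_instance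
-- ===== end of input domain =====

-- B replaces A's nested index-driven while loops by one flat fold with an Option accumulator
-- (objective: simpler / alternative decomposition; same O(n) cost).

-- shared expressions both Python versions literally contain:
-- joined.rstrip().endswith("\\")
def pvEndsBS (s : String) : Bool := PySem.Str.endswith (PySem.Str.rstrip s) "\\"
-- joined.rstrip()[:-1] + " " + line   (s[:-1] = dropLast on code points — exact; '+' on str = list append of code points — exact on ASCII and beyond)
def pvJoin (j l : String) : String := String.ofList ((PySem.Str.rstrip j).toList.dropLast ++ (' ' :: l.toList))

-- ===== PORT A =====
-- inner while: while joined.rstrip().endswith("\\") and i + 1 < len(lines): i += 1; joined = …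
def pvJoinContA (joined : String) : List String → String × List String
  | [] => (joined, [])
  | l :: rest => if pvEndsBS joined then pvJoinContA (pvJoin joined l) rest else (joined, l :: rest)

theorem pvJoinContA_len (j : String) (ls : List String) : (pvJoinContA j ls).2.length ≤ ls.length := by
  induction ls generalizing j with
  | nil => simp [pvJoinContA]
  | cons l rest ih =>
    simp only [pvJoinContA]
    split
    · exact Nat.le_trans (ih _) (Nat.le_succ _)
    · simp

-- outer while over the line index
def pvGoA : List String → List String
  | [] => []
  | l :: rest =>
    if PySem.Str.isIn "uv run gunicorn" l then
      (pvJoinContA l rest).1 :: pvGoA (pvJoinContA l rest).2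
    else pvGoA rest
  termination_by ls => ls.length
  decreasing_by
  · exact Nat.lt_succ_of_le (pvJoinContA_len l rest)
  · simp

def gunicorn_invocations_py (text : String) : List String :=
  pvGoA (PySem.Str.splitlines text)

-- ===== PORT B =====
-- one step of B's flat loop; state = (out, current)
def pvStepB (acc : List String × Option String) (line : String) : List String × Option String :=
  match acc.2 with
  | none =>
    if PySem.Str.isIn "uv run gunicorn" line then
      if pvEndsBS line then (acc.1, some line) else (acc.1 ++ [line], none)
    else acc
  | some cur =>
    let cur' := pvJoin cur line
    if pvEndsBS cur' then (acc.1, some cur') else (acc.1 ++ [cur'], none)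

def gunicorn_invocations_py_alt (text : String) : List String :=
  let st := (PySem.Str.splitlines text).foldl pvStepB ([], none)
  match st.2 with
  | some cur => st.1 ++ [cur]
  | none => st.1

-- ===== PRECONDITION & SPEC =====
def Spec_gunicorn_invocations_py (text : String) (out : List String) : Prop := out = gunicorn_invocations_py_alt text
instance (text : String) (out : List String) : Decidable (Spec_gunicorn_invocations_py text out) := by unfold Spec_gunicorn_invocations_py; infer_instance

-- ===== CLAIM (what is proved, stated in full; the proofs are below) =====
def Claim_equal_gunicorn_invocations_py : Prop := ∀ (text : String), Dom_gunicorn_invocations_py text → Spec_gunicorn_invocations_py text (gunicorn_invocations_py text)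

-- ===== LEMMAS AND PROOFS =====

-- B's final flush
def pvFlush (st : List String × Option String) : List String :=
  match st.2 with
  | some cur => st.1 ++ [cur]
  | none => st.1

theorem pvJoinContA_of_not_ends (j : String) (ls : List String) (h : pvEndsBS j = false) :
    pvJoinContA j ls = (j, ls) := by
  cases ls with
  | nil => rfl
  | cons l rest => simp [pvJoinContA, h]

-- the two loop invariants, proved together by induction on the remaining lines
theorem pvMain (ls : List String) :
    (∀ out cur, pvEndsBS cur = true →
      pvFlush (ls.foldl pvStepB (out, some cur)) =
        out ++ (pvJoinContA cur ls).1 :: pvGoA (pvJoinContA cur ls).2) ∧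
    (∀ out, pvFlush (ls.foldl pvStepB (out, none)) = out ++ pvGoA ls) := by
  induction ls with
  | nil =>
    refine ⟨fun out cur _ => ?_, fun out => ?_⟩
    · simp [pvFlush, pvJoinContA, pvGoA]
    · simp [pvFlush, pvGoA]
  | cons l rest ih =>
    obtain ⟨ih1, ih2⟩ := ih
    constructor
    · intro out cur hc
      simp only [List.foldl_cons, pvStepB, pvJoinContA, hc, if_true]
      by_cases h' : pvEndsBS (pvJoin cur l) = true
      · simp only [h', if_true]
        exact ih1 out (pvJoin cur l) h'
      · rw [Bool.not_eq_true] at h'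
        simp only [h', Bool.false_eq_true, if_false]
        rw [ih2 (out ++ [pvJoin cur l]), pvJoinContA_of_not_ends _ _ h']
        simp
    · intro out
      by_cases ht : PySem.Str.isIn "uv run gunicorn" l = true
      · by_cases hb : pvEndsBS l = true
        · simp only [List.foldl_cons, pvStepB, ht, hb, if_true]
          rw [ih1 out l hb]
          simp only [pvGoA, ht, if_true]
        · rw [Bool.not_eq_true] at hb
          simp only [List.foldl_cons, pvStepB, ht, hb, if_true, Bool.false_eq_true, if_false]
          rw [ih2 (out ++ [l])]
          simp only [pvGoA, ht, if_true, pvJoinContA_of_not_ends _ _ hb]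
          simp
      · rw [Bool.not_eq_true] at ht
        simp only [List.foldl_cons, pvStepB, ht, Bool.false_eq_true, if_false]
        rw [ih2 out]
        simp only [pvGoA, ht, Bool.false_eq_true, if_false]

-- ===== VERDICT (by name: the statement is the Claim_ definition above) =====
theorem gunicorn_invocations_py_spec : Claim_equal_gunicorn_invocations_py := by
  intro text _
  unfold Spec_gunicorn_invocations_py gunicorn_invocations_py gunicorn_invocations_py_alt
  have h := (pvMain (PySem.Str.splitlines text)).2 []
  simpa [pvFlush] using h.symm
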